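-- pv_equiv track=rewrite | github.com/Roarster/AdventOfCode | day5.py | is_line_better_nice
-- ===== SOURCE A (Python) =====
-- def is_line_better_nice(line):
--     has_single_repeat = False
--     has_double_repeat = False
--     for index in range(0, len(line) - 2):
--         character = line[index]
--         if character == line[index + 2]:
--             has_single_repeat = True
--         if character + line[index + 1] in line[index + 2:]:
--             has_double_repeat = True
--     return has_single_repeat and has_double_repeat
-- ===== SOURCE B (Python) =====
-- def is_line_better_nice(line):
--     n = len(line)
--     has_single = False
--     has_double = False
--     first = {}
--     for i in range(n - 1):
--         pair = (line[i], line[i + 1])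
--         if pair not in first:
--             first[pair] = i
--         elif i - first[pair] >= 2:
--             has_double = True
--         if i + 2 < n and line[i] == line[i + 2]:
--             has_single = True
--     return has_single and has_double
-- ===== Notes on version B (the rewrite author's own statement) =====
-- stated objective: faster
-- what changed: Replaces A's per-index substring search of the pair in the rest of the string (O(n^2)) by a single pass that records each pair's first occurrence index in a dict and flags a repeat when the current index is at least 2 past that first index.
import Mathlib
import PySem

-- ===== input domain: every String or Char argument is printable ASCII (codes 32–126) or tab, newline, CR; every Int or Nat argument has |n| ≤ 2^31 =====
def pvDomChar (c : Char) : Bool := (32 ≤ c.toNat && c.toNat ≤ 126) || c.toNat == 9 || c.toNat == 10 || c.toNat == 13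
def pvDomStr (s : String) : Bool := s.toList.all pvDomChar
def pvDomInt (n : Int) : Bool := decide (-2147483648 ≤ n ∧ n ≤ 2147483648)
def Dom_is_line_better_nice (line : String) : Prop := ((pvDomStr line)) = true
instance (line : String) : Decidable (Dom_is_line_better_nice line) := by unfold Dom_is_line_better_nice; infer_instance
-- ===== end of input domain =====

-- B replaces A's per-index substring search by a one-pass dict of pair -> first index (faster).


-- ===== PORT A =====
-- the loop body of A ('for index in range(0, len(line) - 2): …'), state = (has_single_repeat, has_double_repeat)
def stepA (cs : List Char) (st : Bool × Bool) (index : Int) : Bool × Bool :=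
  let character := PySem.List.pyGetD cs index ' '
  let hs := if character = PySem.List.pyGetD cs (index + 2) ' ' then true else st.1
  let hd := if PySem.Chars.isIn [character, PySem.List.pyGetD cs (index + 1) ' ']
                 (PySem.List.slice cs (some (index + 2)) none) = true then true else st.2
  (hs, hd)

def is_line_better_nice (line : String) : Bool :=
  let cs := line.toList
  let r := (PySem.List.pyRange 0 ((cs.length : Int) - 2) 1).foldl (stepA cs) (false, false)
  r.1 && r.2

-- ===== PORT B =====
-- the loop body of B ('for i in range(n - 1): …'), state = (has_single, has_double, first)
def stepB (cs : List Char) (st : Bool × Bool × PySem.Dict (Char × Char) Int) (i : Int) :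
    Bool × Bool × PySem.Dict (Char × Char) Int :=
  let pair := (PySem.List.pyGetD cs i ' ', PySem.List.pyGetD cs (i + 1) ' ')
  let hdf : Bool × PySem.Dict (Char × Char) Int :=
    if st.2.2.get? pair = none then (st.2.1, st.2.2.insert pair i)
    else if 2 ≤ i - (st.2.2.get? pair).getD 0 then (true, st.2.2)
    else (st.2.1, st.2.2)
  let hs := if (i + 2 < (cs.length : Int) ∧
                PySem.List.pyGetD cs i ' ' = PySem.List.pyGetD cs (i + 2) ' ') then true else st.1
  (hs, hdf.1, hdf.2)

def is_line_better_nice_alt (line : String) : Bool :=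
  let cs := line.toList
  let r := (PySem.List.pyRange 0 ((cs.length : Int) - 1) 1).foldl (stepB cs)
             (false, false, PySem.Dict.empty)
  r.1 && r.2.1

-- ===== PRECONDITION & SPEC =====
def Spec_is_line_better_nice (line : String) (out : Bool) : Prop := out = is_line_better_nice_alt line
instance (line : String) (out : Bool) : Decidable (Spec_is_line_better_nice line out) := by unfold Spec_is_line_better_nice; infer_instance

-- ===== CLAIM (what is proved, stated in full; the proofs are below) =====
def Claim_equal_is_line_better_nice : Prop := ∀ (line : String), Dom_is_line_better_nice line → Spec_is_line_better_nice line (is_line_better_nice line)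

-- ===== LEMMAS AND PROOFS =====

-- the pair of characters at position i (both programs compare these)
def pairAt (cs : List Char) (i : Nat) : Char × Char := (cs.getD i ' ', cs.getD (i + 1) ' ')

-- "some index i < k has cs[i] = cs[i+2]" (single-repeat condition, indices below k)
abbrev P1 (cs : List Char) (k : Nat) : Prop :=
  ∃ i : Nat, i < k ∧ i + 2 < cs.length ∧ cs.getD i ' ' = cs.getD (i + 2) ' '

-- "some pair repeats without overlap, second occurrence at j < k"
abbrev P2 (cs : List Char) (k : Nat) : Prop :=
  ∃ j < k, j + 1 < cs.length ∧ ∃ i < j, i + 2 ≤ j ∧ pairAt cs i = pairAt cs j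

-- first index < k whose pair equals p (what B's dict stores)
def firstIdx (cs : List Char) (k : Nat) (p : Char × Char) : Option Int :=
  match k with
  | 0 => none
  | k + 1 =>
    match firstIdx cs k p with
    | some f => some f
    | none => if pairAt cs k = p then some (k : Int) else none

lemma firstIdx_some_mem (cs : List Char) (k : Nat) (p : Char × Char) (f : Int)
    (h : firstIdx cs k p = some f) : ∃ fn : Nat, f = (fn : Int) ∧ fn < k ∧ pairAt cs fn = p := by
  induction k with
  | zero => simp [firstIdx] at h
  | succ k ih =>
    rw [firstIdx] at h
    cases hq : firstIdx cs k p with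
    | some g =>
      rw [hq] at h
      have h' : some g = some f := h
      obtain ⟨fn, h1, h2, h3⟩ := ih ((Option.some.inj h') ▸ hq)
      exact ⟨fn, h1, by omega, h3⟩
    | none =>
      rw [hq] at h
      have h' : (if pairAt cs k = p then some ((k : Int)) else none) = some f := h
      by_cases hp : pairAt cs k = p
      · rw [if_pos hp] at h'
        exact ⟨k, (Option.some.inj h').symm, by omega, hp⟩
      · rw [if_neg hp] at h'
        exact absurd h' (by simp)

lemma firstIdx_none_iff (cs : List Char) (k : Nat) (p : Char × Char) :
    firstIdx cs k p = none ↔ ∀ i < k, pairAt cs i ≠ p := by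
  induction k with
  | zero => simp [firstIdx]
  | succ k ih =>
    rw [firstIdx]
    cases hq : firstIdx cs k p with
    | some g =>
      simp only [reduceCtorEq, false_iff]
      obtain ⟨fn, h1, h2, h3⟩ := firstIdx_some_mem cs k p g hq
      exact fun h => h fn (by omega) h3
    | none =>
      rw [ih] at hq
      by_cases hp : pairAt cs k = p
      · simp only [if_pos hp, reduceCtorEq, false_iff]
        exact fun h => h k (by omega) hp
      · simp only [if_neg hp, true_iff]
        intro i hi
        rcases Nat.lt_succ_iff_lt_or_eq.mp hi with h | h
        · exact hq i h
        · subst h; exact hp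

lemma firstIdx_some_iff (cs : List Char) (k : Nat) (p : Char × Char) : ∀ f : Int,
    firstIdx cs k p = some f ↔
      ∃ fn : Nat, f = (fn : Int) ∧ fn < k ∧ pairAt cs fn = p ∧ ∀ i < fn, pairAt cs i ≠ p := by
  induction k with
  | zero => intro f; simp [firstIdx]
  | succ k ih =>
    intro f
    rw [firstIdx]
    cases hq : firstIdx cs k p with
    | some g =>
      obtain ⟨gn, hg1, hg2, hg3, hg4⟩ := (ih g).mp hq
      constructor
      · intro h
        have hfg : g = f := Option.some.inj h
        exact ⟨gn, hfg ▸ hg1, by omega, hg3, hg4⟩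
      · rintro ⟨fn, rfl, hfn, hp3, hmin⟩
        have : fn = gn := by
          rcases Nat.lt_trichotomy fn gn with h | h | h
          · exact absurd hp3 (hg4 fn h)
          · exact h
          · exact absurd hg3 (hmin gn h)
        subst this
        rw [hg1]
    | none =>
      rw [firstIdx_none_iff] at hq
      by_cases hp : pairAt cs k = p
      · rw [if_pos hp]
        constructor
        · intro h
          have : f = (k : Int) := (Option.some.inj h).symm
          exact ⟨k, this, by omega, hp, hq⟩
        · rintro ⟨fn, rfl, hfn, hp3, hmin⟩
          have : fn = k := by
            rcases Nat.lt_succ_iff_lt_or_eq.mp hfn with h | h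
            · exact absurd hp3 (hq fn h)
            · exact h
          subst this; rfl
      · rw [if_neg hp]
        constructor
        · intro h; exact absurd h (by simp)
        · rintro ⟨fn, rfl, hfn, hp3, hmin⟩
          rcases Nat.lt_succ_iff_lt_or_eq.mp hfn with h | h
          · exact absurd hp3 (hq fn h)
          · subst h; exact absurd hp3 hp

-- A's accumulating loop, componentwise
lemma stepA_foldl (cs : List Char) (l : List Int) (st : Bool × Bool) :
    l.foldl (stepA cs) st =
      (st.1 || l.any (fun i => decide (PySem.List.pyGetD cs i ' ' = PySem.List.pyGetD cs (i + 2) ' ')),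
       st.2 || l.any (fun i => PySem.Chars.isIn
                [PySem.List.pyGetD cs i ' ', PySem.List.pyGetD cs (i + 1) ' ']
                (PySem.List.slice cs (some (i + 2)) none))) := by
  induction l generalizing st with
  | nil => simp
  | cons x xs ih =>
    simp only [List.foldl_cons, ih, List.any_cons, stepA]
    by_cases h1 : PySem.List.pyGetD cs x ' ' = PySem.List.pyGetD cs (x + 2) ' ' <;>
      by_cases h2 : PySem.Chars.isIn [PySem.List.pyGetD cs x ' ', PySem.List.pyGetD cs (x + 1) ' ']
          (PySem.List.slice cs (some (x + 2)) none) = true <;>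
      simp [h1, h2, Bool.or_assoc, Bool.or_comm]

lemma getD_drop (l : List Char) (m t : Nat) : (l.drop m).getD t ' ' = l.getD (m + t) ' ' := by
  simp [List.getD_eq_getElem?_getD, List.getElem?_drop]

-- a two-character list is a prefix of l iff l starts with those two characters
lemma two_prefix_iff (a b : Char) (l : List Char) :
    [a, b] <+: l ↔ 2 ≤ l.length ∧ l.getD 0 ' ' = a ∧ l.getD 1 ' ' = b := by
  cases l with
  | nil => simp
  | cons x l' =>
    cases l' with
    | nil => simp [List.cons_prefix_cons]
    | cons y t => simp [List.cons_prefix_cons, eq_comm]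

-- A's double-repeat test at index i, rephrased
lemma gA_iff (cs : List Char) (i : Nat) (_hi : i + 2 < cs.length) :
    (PySem.Chars.isIn [cs.getD i ' ', cs.getD (i + 1) ' ']
        (PySem.List.slice cs (some ((i : Int) + 2)) none) = true)
      ↔ ∃ j : Nat, i + 2 ≤ j ∧ j + 1 < cs.length ∧ pairAt cs j = pairAt cs i := by
  rw [show ((i : Int) + 2) = ((i + 2 : Nat) : Int) by push_cast; ring]
  rw [PySem.List.slice_from_natCast]
  rw [← PySem.Chars.exists_prefix_drop_iff_isIn]
  constructor
  · rintro ⟨j, hpre⟩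
    rw [List.drop_drop, two_prefix_iff] at hpre
    obtain ⟨hlen, h0, h1⟩ := hpre
    rw [List.length_drop] at hlen
    rw [getD_drop] at h0 h1
    refine ⟨i + 2 + j, by omega, by omega, ?_⟩
    simp only [pairAt, Prod.mk.injEq]
    exact ⟨by simpa using h0, h1⟩
  · rintro ⟨j, hij, hjl, hpj⟩
    refine ⟨j - (i + 2), ?_⟩
    rw [List.drop_drop, show i + 2 + (j - (i + 2)) = j by omega, two_prefix_iff]
    simp only [pairAt, Prod.mk.injEq] at hpj
    refine ⟨by rw [List.length_drop]; omega, ?_, ?_⟩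
    · rw [getD_drop, show j + 0 = j by omega, hpj.1]
    · rw [getD_drop, hpj.2]

lemma A_eval (cs : List Char) :
    (PySem.List.pyRange 0 ((cs.length : Int) - 2) 1).foldl (stepA cs) (false, false)
      = (decide (P1 cs cs.length), decide (P2 cs cs.length)) := by
  rw [stepA_foldl]
  simp only [Bool.false_or, Prod.mk.injEq]
  constructor
  · rw [Bool.eq_iff_iff]
    simp only [List.any_eq_true, PySem.List.mem_pyRange_one, decide_eq_true_eq]
    constructor
    · rintro ⟨x, ⟨hx0, hx2⟩, heq⟩
      obtain ⟨i, rfl⟩ := Int.eq_ofNat_of_zero_le hx0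
      rw [show ((i : Int) + 2) = ((i + 2 : Nat) : Int) by push_cast; ring] at heq
      simp only [PySem.List.pyGetD_natCast] at heq
      exact ⟨i, by omega, by omega, heq⟩
    · rintro ⟨i, hi, hi2, heq⟩
      refine ⟨(i : Int), ⟨by positivity, by omega⟩, ?_⟩
      rw [show ((i : Int) + 2) = ((i + 2 : Nat) : Int) by push_cast; ring]
      simp only [PySem.List.pyGetD_natCast]
      exact heq
  · rw [Bool.eq_iff_iff]
    simp only [List.any_eq_true, PySem.List.mem_pyRange_one, decide_eq_true_eq]
    constructor
    · rintro ⟨x, ⟨hx0, hx2⟩, hin⟩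
      obtain ⟨i, rfl⟩ := Int.eq_ofNat_of_zero_le hx0
      rw [show ((i : Int) + 1) = ((i + 1 : Nat) : Int) by push_cast; ring] at hin
      simp only [PySem.List.pyGetD_natCast] at hin
      have hi2 : i + 2 < cs.length := by omega
      obtain ⟨j, hij, hjl, hpj⟩ := (gA_iff cs i hi2).mp hin
      exact ⟨j, by omega, hjl, i, by omega, hij, hpj.symm⟩
    · rintro ⟨j, hjk, hjl, i, hilt, hij, he⟩
      have hi2 : i + 2 < cs.length := by omega
      refine ⟨(i : Int), ⟨by positivity, by omega⟩, ?_⟩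
      rw [show ((i : Int) + 1) = ((i + 1 : Nat) : Int) by push_cast; ring]
      simp only [PySem.List.pyGetD_natCast]
      exact (gA_iff cs i hi2).mpr ⟨j, hij, hjl, he.symm⟩

-- when the current pair was already seen, the dict of first indices does not change
lemma firstIdx_succ_of_some (cs : List Char) (k : Nat) (q : Char × Char) (f : Int)
    (hfi : firstIdx cs k q = some f) (hq : pairAt cs k = q) (p : Char × Char) :
    firstIdx cs k p = firstIdx cs (k + 1) p := by
  rw [firstIdx]
  cases hp : firstIdx cs k p with
  | some g => rfl
  | none =>
    have hne : ¬ (pairAt cs k = p) := by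
      intro h
      rw [← h, hq, hfi] at hp
      exact absurd hp (by simp)
    simp [hne]

-- B's loop invariant
lemma B_inv (cs : List Char) (k : Nat) (hk : k + 1 ≤ cs.length ∨ k = 0) :
    ((PySem.List.pyRange 0 (k : Int) 1).foldl (stepB cs) (false, false, PySem.Dict.empty)).1
        = decide (P1 cs k)
    ∧ ((PySem.List.pyRange 0 (k : Int) 1).foldl (stepB cs) (false, false, PySem.Dict.empty)).2.1
        = decide (P2 cs k)
    ∧ ∀ p, (((PySem.List.pyRange 0 (k : Int) 1).foldl (stepB cs) (false, false, PySem.Dict.empty)).2.2).get? p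
        = firstIdx cs k p := by
  induction k with
  | zero =>
    rw [show ((0 : Nat) : Int) = 0 from rfl, PySem.List.pyRange_one_eq_nil le_rfl]
    refine ⟨?_, ?_, fun p => by simp [firstIdx, PySem.Dict.get?_empty]⟩
    · have h : ¬ P1 cs 0 := by rintro ⟨i, h, -, -⟩; omega
      simp [h]
    · have h : ¬ P2 cs 0 := by rintro ⟨j, h, -⟩; omega
      simp [h]
  | succ k ih =>
    have hk2 : k + 2 ≤ cs.length := by rcases hk with h | h <;> omega
    obtain ⟨ih1, ih2, ih3⟩ := ih (Or.inl (by omega))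
    rw [show ((k + 1 : Nat) : Int) = (k : Int) + 1 by push_cast; ring,
        PySem.List.pyRange_one_succ_right (by positivity), List.foldl_append,
        List.foldl_cons, List.foldl_nil]
    set st := (PySem.List.pyRange 0 (k : Int) 1).foldl (stepB cs) (false, false, PySem.Dict.empty) with hst
    have hc1 : PySem.List.pyGetD cs (k : Int) ' ' = cs.getD k ' ' := by
      simp only [PySem.List.pyGetD_natCast]
    have hc2 : PySem.List.pyGetD cs ((k : Int) + 1) ' ' = cs.getD (k + 1) ' ' := by
      rw [show ((k : Int) + 1) = ((k + 1 : Nat) : Int) by push_cast; ring]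
      simp only [PySem.List.pyGetD_natCast]
    have hc3 : PySem.List.pyGetD cs ((k : Int) + 2) ' ' = cs.getD (k + 2) ' ' := by
      rw [show ((k : Int) + 2) = ((k + 2 : Nat) : Int) by push_cast; ring]
      simp only [PySem.List.pyGetD_natCast]
    have hpk : pairAt cs k = (cs.getD k ' ', cs.getD (k + 1) ' ') := rfl
    simp only [stepB, hc1, hc2, hc3, ih3 (cs.getD k ' ', cs.getD (k + 1) ' ')]
    refine ⟨?_, ?_, ?_⟩
    · -- single-repeat component
      rw [ih1]
      split_ifs with hcnd
      · obtain ⟨hcl, hce⟩ := hcnd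
        exact (decide_eq_true ⟨k, by omega, by omega, hce⟩).symm
      · rw [decide_eq_decide]
        constructor
        · rintro ⟨i, hi, hi2, he⟩; exact ⟨i, by omega, hi2, he⟩
        · rintro ⟨i, hi, hi2, he⟩
          rcases Nat.lt_succ_iff_lt_or_eq.mp hi with hh | hh
          · exact ⟨i, hh, hi2, he⟩
          · subst hh; exact absurd ⟨by omega, he⟩ hcnd
    · -- double-repeat component
      cases hfi : firstIdx cs k (cs.getD k ' ', cs.getD (k + 1) ' ') with
      | none =>
        rw [if_pos rfl]
        show st.2.1 = decide (P2 cs (k + 1))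
        rw [ih2, decide_eq_decide]
        constructor
        · rintro ⟨j, hj, hjl, i, hilt, h2, he⟩; exact ⟨j, by omega, hjl, i, hilt, h2, he⟩
        · rintro ⟨j, hj, hjl, i, hilt, h2, he⟩
          rcases Nat.lt_succ_iff_lt_or_eq.mp hj with hh | hh
          · exact ⟨j, hh, hjl, i, hilt, h2, he⟩
          · subst hh
            have hne := (firstIdx_none_iff cs _ _).mp hfi i (by omega)
            rw [hpk] at he
            exact absurd he hne
      | some f =>
        obtain ⟨fn, hfeq, hfn, hfp, hfmin⟩ := (firstIdx_some_iff cs k _ f).mp hfi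
        subst hfeq
        rw [if_neg (show ¬(some ((fn : Int)) = (none : Option Int)) by simp)]
        simp only [Option.getD_some]
        by_cases hge : 2 ≤ (k : Int) - (fn : Int)
        · rw [if_pos hge]
          refine (decide_eq_true ⟨k, by omega, by omega, fn, by omega, by omega, ?_⟩).symm
          rw [hfp, hpk]
        · rw [if_neg hge]
          show st.2.1 = decide (P2 cs (k + 1))
          rw [ih2, decide_eq_decide]
          constructor
          · rintro ⟨j, hj, hjl, i, hilt, h2, he⟩; exact ⟨j, by omega, hjl, i, hilt, h2, he⟩
          · rintro ⟨j, hj, hjl, i, hilt, h2, he⟩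
            rcases Nat.lt_succ_iff_lt_or_eq.mp hj with hh | hh
            · exact ⟨j, hh, hjl, i, hilt, h2, he⟩
            · subst hh
              exfalso
              rw [hpk] at he
              have hfle : fn ≤ i := by
                by_contra hlt
                exact (hfmin i (by omega)) he
              omega
    · -- dict component
      intro p
      cases hfi : firstIdx cs k (cs.getD k ' ', cs.getD (k + 1) ' ') with
      | none =>
        rw [if_pos rfl]
        show (st.2.2.insert (cs.getD k ' ', cs.getD (k + 1) ' ') (k : Int)).get? p = firstIdx cs (k + 1) p
        rw [PySem.Dict.get?_insert]
        by_cases hp : p = (cs.getD k ' ', cs.getD (k + 1) ' ')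
        · subst hp
          rw [if_pos rfl, firstIdx, hfi]
          exact (if_pos hpk).symm
        · rw [if_neg hp, ih3 p, firstIdx]
          cases hq : firstIdx cs k p with
          | some g => rfl
          | none =>
            have hne : ¬ (pairAt cs k = p) := fun h => hp (by rw [← h, hpk])
            simp [hne]
      | some f =>
        obtain ⟨fn, hfeq, hfn, hfp, hfmin⟩ := (firstIdx_some_iff cs k _ f).mp hfi
        subst hfeq
        rw [if_neg (show ¬(some ((fn : Int)) = (none : Option Int)) by simp)]
        simp only [Option.getD_some]
        by_cases hge : 2 ≤ (k : Int) - (fn : Int)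
        · rw [if_pos hge]
          show st.2.2.get? p = firstIdx cs (k + 1) p
          rw [ih3 p]
          exact firstIdx_succ_of_some cs k _ _ hfi hpk p
        · rw [if_neg hge]
          show st.2.2.get? p = firstIdx cs (k + 1) p
          rw [ih3 p]
          exact firstIdx_succ_of_some cs k _ _ hfi hpk p

lemma B_eval (cs : List Char) :
    ((PySem.List.pyRange 0 ((cs.length : Int) - 1) 1).foldl (stepB cs)
        (false, false, PySem.Dict.empty)).1 = decide (P1 cs cs.length)
    ∧ ((PySem.List.pyRange 0 ((cs.length : Int) - 1) 1).foldl (stepB cs)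
        (false, false, PySem.Dict.empty)).2.1 = decide (P2 cs cs.length) := by
  by_cases hn : cs.length = 0
  · simp only [hn, Nat.cast_zero]
    rw [PySem.List.pyRange_one_eq_nil (by omega)]
    have h1 : ¬ P1 cs 0 := by rintro ⟨i, h, -, -⟩; omega
    have h2 : ¬ P2 cs 0 := by rintro ⟨j, h, -⟩; omega
    simp [h1, h2]
  · have hcast : ((cs.length : Int) - 1) = ((cs.length - 1 : Nat) : Int) := by omega
    rw [hcast]
    obtain ⟨e1, e2, -⟩ := B_inv cs (cs.length - 1) (Or.inl (by omega))
    rw [e1, e2]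
    constructor
    · rw [decide_eq_decide]
      constructor
      · rintro ⟨i, hi, hi2, he⟩; exact ⟨i, by omega, hi2, he⟩
      · rintro ⟨i, hi, hi2, he⟩; exact ⟨i, by omega, hi2, he⟩
    · rw [decide_eq_decide]
      constructor
      · rintro ⟨j, hj, hjl, i, hilt, h2, he⟩; exact ⟨j, by omega, hjl, i, hilt, h2, he⟩
      · rintro ⟨j, hj, hjl, i, hilt, h2, he⟩; exact ⟨j, by omega, hjl, i, hilt, h2, he⟩

-- ===== VERDICT (by name: the statement is the Claim_ definition above) =====
theorem is_line_better_nice_spec : Claim_equal_is_line_better_nice := by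
  intro line _
  unfold Spec_is_line_better_nice
  simp only [is_line_better_nice, is_line_better_nice_alt, A_eval]
  obtain ⟨b1, b2⟩ := B_eval line.toList
  rw [b1, b2]
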